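-- pv_equiv track=rewrite | github.com/qfishpear/gpw_mkv_uploady | run_all.py | is_valid_mkvname
-- ===== SOURCE A (Python) =====
-- def is_valid_mkvname(mkvpath):
--     BANNED_KEYWORDS = [
--         # 忽略剧集
--         "S0", "E0",
--         # 忽略sample
--         "sample",
--         # 忽略被禁止的发布组
--        "aXXo", "BRrip", "CM8", "CrEwSaDe", "DNL", "EVO", "FaNGDiNG0", "FRDS",
--        "HD2DVD", "HDTime", "iPlanet", "KiNGDOM", "Leffe", "mHD", "mSD", "nHD",
--        "nikt0", "nSD", "NhaNc3", "PRODJi", "RDN", "SANTi", "STUTTERSHIT", "TERMiNAL",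
--        "ViSION", "WAF", "x0r", "YIFY"
--     ]
--     for groupname in BANNED_KEYWORDS:
--         if groupname.lower() in mkvpath.lower():
--             return False
--     return True
-- ===== SOURCE B (Python) =====
-- def is_valid_mkvname(mkvpath):
--     # the banned keywords, pre-lowered (matching is case-insensitive anyway)
--     BANNED = ["s0", "e0", "sample", "axxo", "brrip", "cm8", "crewsade", "dnl",
--               "evo", "fangding0", "frds", "hd2dvd", "hdtime", "iplanet",
--               "kingdom", "leffe", "mhd", "msd", "nhd", "nikt0", "nsd",
--               "nhanc3", "prodji", "rdn", "santi", "stuttershit", "terminal",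
--               "vision", "waf", "x0r", "yify"]
--     # build a trie (dict of dicts) of the keywords, once
--     trie = {}
--     for kw in BANNED:
--         node = trie
--         for ch in kw:
--             node = node.setdefault(ch, {})
--         node["$end"] = True
--     # walk the trie from every position of the lowered path
--     low = mkvpath.lower()
--     n = len(low)
--     for i in range(n):
--         node = trie
--         j = i
--         while True:
--             if "$end" in node:
--                 return False
--             if j >= n or low[j] not in node:
--                 break
--             node = node[low[j]]
--             j += 1
--     return True
-- ===== Notes on version B (the rewrite author's own statement) =====
-- stated objective: alternative
-- what changed: B builds a trie (dict-of-dicts) of the lowered keywords once and walks that trie from every position of the lowered path, instead of A's per-keyword substring scans that lower the whole path for each keyword.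
import Mathlib
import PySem

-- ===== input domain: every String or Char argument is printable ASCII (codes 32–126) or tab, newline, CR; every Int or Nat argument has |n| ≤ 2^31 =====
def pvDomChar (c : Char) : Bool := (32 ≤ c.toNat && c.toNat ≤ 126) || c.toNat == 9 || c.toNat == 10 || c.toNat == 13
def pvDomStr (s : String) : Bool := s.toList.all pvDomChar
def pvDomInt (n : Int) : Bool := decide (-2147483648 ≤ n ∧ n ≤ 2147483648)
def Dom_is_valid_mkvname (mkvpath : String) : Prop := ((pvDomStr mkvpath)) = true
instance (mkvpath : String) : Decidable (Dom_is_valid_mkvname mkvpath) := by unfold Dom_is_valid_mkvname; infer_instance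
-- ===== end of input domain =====

-- B builds a trie of the lowered keywords once and walks it from every position of the lowered path (alternative algorithm/data structure; A rescans per keyword).


-- ===== PORT A =====
def pvBannedKeywords : List String :=
  ["S0", "E0", "sample",
   "aXXo", "BRrip", "CM8", "CrEwSaDe", "DNL", "EVO", "FaNGDiNG0", "FRDS",
   "HD2DVD", "HDTime", "iPlanet", "KiNGDOM", "Leffe", "mHD", "mSD", "nHD",
   "nikt0", "nSD", "NhaNc3", "PRODJi", "RDN", "SANTi", "STUTTERSHIT", "TERMiNAL",
   "ViSION", "WAF", "x0r", "YIFY"]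

-- A's loop: for each keyword, 'groupname.lower() in mkvpath.lower()' → return False; else True.
def pvALoop (ks : List String) (mkvpath : String) : Bool :=
  match ks with
  | [] => true
  | k :: rest =>
      if PySem.Str.isIn (PySem.Str.lower k) (PySem.Str.lower mkvpath) then false
      else pvALoop rest mkvpath

def is_valid_mkvname (mkvpath : String) : Bool := pvALoop pvBannedKeywords mkvpath

-- ===== PORT B =====
-- B's dict-of-dicts trie, in left-child/right-sibling form (a nested 'List (Char × Trie)'
-- inductive is not allowed): 'node b c child sib' is a level entry for character c whose
-- terminal flag b plays the role of Python's "$end" key at the node reached through c.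
inductive PvTrie : Type
  | leaf : PvTrie
  | node : Bool → Char → PvTrie → PvTrie → PvTrie
deriving DecidableEq, Repr

-- 'node = node.setdefault(ch, {})' walk of one lowered keyword into the trie, ending with node["$end"] = True
def pvInsert : PvTrie → List Char → PvTrie
  | t, [] => t
  | .leaf, c :: cs => .node cs.isEmpty c (pvInsert .leaf cs) .leaf
  | .node b c' child sib, c :: cs =>
      if c = c' then .node (b || cs.isEmpty) c' (pvInsert child cs) sib
      else .node b c' child (pvInsert sib (c :: cs))
termination_by t k => (sizeOf t, k.length)

-- B's inner 'while True' walk from one position: follow matching characters, reporting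
-- True as soon as a terminal ("$end") entry is consumed.
def pvWalk : PvTrie → List Char → Bool
  | .leaf, _ => false
  | .node _ _ _ _, [] => false
  | .node b c' child sib, c :: cs =>
      if c = c' then b || pvWalk child cs else pvWalk sib (c :: cs)

-- B's outer 'for i in range(n)' loop: try a trie walk from every position of the lowered path.
def pvScan (t : PvTrie) : List Char → Bool
  | [] => false
  | c :: rest => pvWalk t (c :: rest) || pvScan t rest

-- B's keyword list, pre-lowered
def pvBannedLower : List (List Char) :=
  (["s0", "e0", "sample", "axxo", "brrip", "cm8", "crewsade", "dnl",
    "evo", "fangding0", "frds", "hd2dvd", "hdtime", "iplanet",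
    "kingdom", "leffe", "mhd", "msd", "nhd", "nikt0", "nsd",
    "nhanc3", "prodji", "rdn", "santi", "stuttershit", "terminal",
    "vision", "waf", "x0r", "yify"] : List String).map String.toList

def pvTrieOfBanned : PvTrie := pvBannedLower.foldl pvInsert .leaf

def is_valid_mkvname_alt (mkvpath : String) : Bool :=
  !pvScan pvTrieOfBanned (PySem.Chars.lower mkvpath.toList)

-- ===== PRECONDITION & SPEC =====
def Spec_is_valid_mkvname (mkvpath : String) (out : Bool) : Prop := out = is_valid_mkvname_alt mkvpath
instance (mkvpath : String) (out : Bool) : Decidable (Spec_is_valid_mkvname mkvpath out) := by unfold Spec_is_valid_mkvname; infer_instance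

-- ===== CLAIM =====
def Claim_equal_is_valid_mkvname : Prop := ∀ (mkvpath : String), Dom_is_valid_mkvname mkvpath → Spec_is_valid_mkvname mkvpath (is_valid_mkvname mkvpath)

-- ===== LEMMAS AND PROOFS =====

-- A's loop returns true iff no lowered keyword is an infix of the lowered path.
theorem pvALoop_eq_true_iff (ks : List String) (p : String) :
    pvALoop ks p = true ↔
      ∀ k ∈ ks, ¬ (PySem.Str.lower k).toList <:+: (PySem.Str.lower p).toList := by
  induction ks with
  | nil => simp [pvALoop]
  | cons k rest ih =>
      rw [pvALoop]
      split_ifs with h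
      · simp only [false_iff, not_forall]
        exact ⟨k, by simp, not_not.mpr ((PySem.Str.isIn_iff_infix _ _).mp h)⟩
      · rw [ih]
        constructor
        · intro hall k' hk'
          rcases List.mem_cons.mp hk' with rfl | hk'
          · intro hinf
            exact h ((PySem.Str.isIn_iff_infix _ _).mpr hinf)
          · exact hall k' hk'
        · intro hall k' hk'
          exact hall k' (List.mem_cons_of_mem _ hk')

-- walking a freshly inserted chain matches exactly that keyword as a prefix
theorem pvWalk_insert_leaf (k : List Char) (hk : k ≠ []) (cs : List Char) :
    pvWalk (pvInsert .leaf k) cs = k.isPrefixOf cs := by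
  induction k generalizing cs with
  | nil => exact absurd rfl hk
  | cons c k' ih =>
      cases cs with
      | nil => simp [pvInsert, pvWalk, List.isPrefixOf]
      | cons d cs' =>
          by_cases hdc : d = c
          · subst hdc
            cases hk' : k' with
            | nil => simp [pvInsert, pvWalk, List.isPrefixOf]
            | cons e k'' =>
                have hne : k' ≠ [] := by simp [hk']
                rw [← hk']
                rw [show pvInsert PvTrie.leaf (d :: k')
                    = PvTrie.node k'.isEmpty d (pvInsert PvTrie.leaf k') PvTrie.leaf from by
                  rw [pvInsert]]
                simp only [pvWalk, hk', List.isEmpty_cons, Bool.false_or,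
                  List.isPrefixOf, beq_self_eq_true, Bool.true_and]
                rw [← hk']
                exact ih hne cs'
          · have hcd : (c == d) = false := by
              simp only [beq_eq_false_iff_ne, ne_eq]
              exact fun h => hdc h.symm
            simp [pvInsert, pvWalk, hdc, List.isPrefixOf, hcd]

-- inserting one (nonempty) keyword adds exactly its prefix-matches to the walk
theorem pvWalk_insert (t : PvTrie) (k : List Char) (hk : k ≠ []) (cs : List Char) :
    pvWalk (pvInsert t k) cs = (pvWalk t cs || k.isPrefixOf cs) := by
  induction t generalizing k cs with
  | leaf => rw [pvWalk_insert_leaf k hk cs]; simp [pvWalk]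
  | node b c' child sib ihc ihs =>
      cases k with
      | nil => exact absurd rfl hk
      | cons c k' =>
          by_cases hcc : c = c'
          · subst hcc
            rw [show pvInsert (.node b c child sib) (c :: k')
                = .node (b || k'.isEmpty) c (pvInsert child k') sib by
              simp [pvInsert]]
            cases cs with
            | nil => simp [pvWalk, List.isPrefixOf]
            | cons d cs' =>
                by_cases hdc : d = c
                · subst hdc
                  simp only [pvWalk]
                  cases hk' : k' with
                  | nil => simp [pvInsert, List.isPrefixOf]
                  | cons e k'' =>
                      rw [← hk', ihc k' (by simp [hk']) cs']
                      simp only [List.isPrefixOf, beq_self_eq_true, Bool.true_and, hk',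
                        List.isEmpty_cons, Bool.or_false]
                      rw [← hk']
                      cases b <;> cases pvWalk child cs' <;>
                        cases k'.isPrefixOf cs' <;> simp
                · have hcd : (c == d) = false := by
                    simp only [beq_eq_false_iff_ne, ne_eq]
                    exact fun h => hdc h.symm
                  simp [pvWalk, hdc, List.isPrefixOf, hcd]
          · rw [show pvInsert (.node b c' child sib) (c :: k')
                = .node b c' child (pvInsert sib (c :: k')) by
              simp [pvInsert, hcc]]
            cases cs with
            | nil => simp [pvWalk, List.isPrefixOf]
            | cons d cs' =>
                by_cases hdc : d = c'
                · have hcd : (c == d) = false := by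
                    simp only [beq_eq_false_iff_ne, ne_eq]
                    exact fun h => hcc (h.trans hdc)
                  simp only [pvWalk, if_pos hdc, List.isPrefixOf, hcd,
                    Bool.false_and, Bool.or_false]
                · simp only [pvWalk, if_neg hdc]
                  rw [ihs (c :: k') (by simp) (d :: cs')]

-- the walk over the built trie tests 'some lowered keyword is a prefix here'
theorem pvWalk_foldl (ks : List (List Char)) (hk : ∀ k ∈ ks, k ≠ []) (t : PvTrie) (cs : List Char) :
    pvWalk (ks.foldl pvInsert t) cs = (pvWalk t cs || ks.any (·.isPrefixOf cs)) := by
  induction ks generalizing t with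
  | nil => simp
  | cons k rest ih =>
      simp only [List.foldl_cons, List.any_cons]
      rw [ih (fun k hkm => hk k (List.mem_cons_of_mem _ hkm)),
          pvWalk_insert t k (hk k (List.mem_cons_self))]
      simp [Bool.or_assoc]

-- B's split keyword list is exactly A's keyword list, lowered
set_option maxRecDepth 8192 in
theorem pvBannedLower_eq :
    pvBannedLower = pvBannedKeywords.map (fun k => (PySem.Str.lower k).toList) := by
  decide

set_option maxRecDepth 8192 in
theorem pvWalk_banned_iff (cs : List Char) :
    pvWalk pvTrieOfBanned cs = true ↔ ∃ k ∈ pvBannedLower, k <+: cs := by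
  rw [pvTrieOfBanned, pvWalk_foldl pvBannedLower (by decide)]
  simp [pvWalk, List.any_eq_true, List.isPrefixOf_iff_prefix]

-- the position scan is false iff no keyword is an infix
set_option maxRecDepth 8192 in
theorem pvScan_eq_false_iff (cs : List Char) :
    pvScan pvTrieOfBanned cs = false ↔ ∀ k ∈ pvBannedLower, ¬ k <:+: cs := by
  induction cs with
  | nil =>
      simp only [pvScan, true_iff]
      intro k hkmem hinf
      exact (by decide : ∀ k ∈ pvBannedLower, k ≠ []) k hkmem (List.eq_nil_of_infix_nil hinf)
  | cons c rest ih =>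
      simp only [pvScan, Bool.or_eq_false_iff, ih]
      constructor
      · rintro ⟨hw, hall⟩ k hkmem hinf
        rcases List.infix_cons_iff.mp hinf with hp | hi
        · rw [(pvWalk_banned_iff _).mpr ⟨k, hkmem, hp⟩] at hw
          exact Bool.true_eq_false.mp hw
        · exact hall k hkmem hi
      · intro hall
        refine ⟨?_, fun k hkm hi => hall k hkm (List.infix_cons_iff.mpr (Or.inr hi))⟩
        cases hw : pvWalk pvTrieOfBanned (c :: rest) with
        | false => rfl
        | true =>
            obtain ⟨k, hkm, hp⟩ := (pvWalk_banned_iff _).mp hw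
            exact absurd hp.isInfix (hall k hkm)

-- ===== VERDICT =====
theorem is_valid_mkvname_spec : Claim_equal_is_valid_mkvname := by
  intro p _
  unfold Spec_is_valid_mkvname is_valid_mkvname is_valid_mkvname_alt
  have hA := pvALoop_eq_true_iff pvBannedKeywords p
  have hB := pvScan_eq_false_iff (PySem.Chars.lower p.toList)
  have hiff : pvALoop pvBannedKeywords p = true ↔
      pvScan pvTrieOfBanned (PySem.Chars.lower p.toList) = false := by
    rw [hA, hB]
    rw [pvBannedLower_eq]
    simp only [List.forall_mem_map]
    constructor
    · intro hall k hkmem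
      simpa [PySem.Str.toList_lower] using hall k hkmem
    · intro hall k hkmem
      simpa [PySem.Str.toList_lower] using hall k hkmem
  cases hA' : pvALoop pvBannedKeywords p <;>
    cases hB' : pvScan pvTrieOfBanned (PySem.Chars.lower p.toList) <;>
      simp_all
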